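-- pv_equiv track=rewrite | github.com/milkshakeiii/pythongame | gameplay.py | direct_path_move_path
-- ===== SOURCE A (Python) =====
-- def unit_placement_in_bounds(coord, unit_size):
--     return (in_bounds(coord)
--             and in_bounds((coord[0]+unit_size-1, coord[1]+unit_size-1)))
--
-- def in_bounds(coord):
--     return coord[0] < 43 and coord[1] < 30 and coord[0] >= 0 and coord[1] >= 0
--
-- def direct_path_move_path(start_coord, part_size, steps, unit_size):
--     result = []
--     for step in steps:
--         path = []
--         current_coord = start_coord
--         for i in range(part_size):
--             current_coord = (current_coord[0]+step[0],
--                              current_coord[1]+step[1])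
--             if unit_placement_in_bounds(current_coord, unit_size):
--                 path.append(current_coord)
--         result.append(path)
--     return result
-- ===== SOURCE B (Python) =====
-- def direct_path_move_path(start_coord, part_size, steps, unit_size):
--     # Instead of stepping through every index and testing bounds, solve the
--     # bounds inequalities for the step index k directly: valid k form an
--     # interval [klo, khi] computed with floor division, then emit only those.
--     x0, y0 = start_coord
--     xlo, xhi = max(0, 1 - unit_size), min(42, 43 - unit_size)
--     ylo, yhi = max(0, 1 - unit_size), min(29, 30 - unit_size)
--     result = []
--     for sx, sy in steps:
--         klo, khi = 1, part_size
--         for c0, d, lo, hi in ((x0, sx, xlo, xhi), (y0, sy, ylo, yhi)):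
--             if d == 0:
--                 if not (lo <= c0 <= hi):
--                     khi = klo - 1
--             elif d > 0:
--                 klo = max(klo, -((c0 - lo) // d))
--                 khi = min(khi, (hi - c0) // d)
--             else:
--                 klo = max(klo, -((c0 - hi) // d))
--                 khi = min(khi, (lo - c0) // d)
--         result.append([(x0 + k * sx, y0 + k * sy) for k in range(klo, khi + 1)])
--     return result
-- ===== Notes on version B (the rewrite author's own statement) =====
-- stated objective: faster
-- what changed: Instead of stepping through every index in range(part_size) and testing bounds, B solves the bounds inequalities for the step index k with floor/ceiling division, obtaining a closed-form valid interval [klo,khi] per step, and emits only the coordinates of that interval.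
import Mathlib
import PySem

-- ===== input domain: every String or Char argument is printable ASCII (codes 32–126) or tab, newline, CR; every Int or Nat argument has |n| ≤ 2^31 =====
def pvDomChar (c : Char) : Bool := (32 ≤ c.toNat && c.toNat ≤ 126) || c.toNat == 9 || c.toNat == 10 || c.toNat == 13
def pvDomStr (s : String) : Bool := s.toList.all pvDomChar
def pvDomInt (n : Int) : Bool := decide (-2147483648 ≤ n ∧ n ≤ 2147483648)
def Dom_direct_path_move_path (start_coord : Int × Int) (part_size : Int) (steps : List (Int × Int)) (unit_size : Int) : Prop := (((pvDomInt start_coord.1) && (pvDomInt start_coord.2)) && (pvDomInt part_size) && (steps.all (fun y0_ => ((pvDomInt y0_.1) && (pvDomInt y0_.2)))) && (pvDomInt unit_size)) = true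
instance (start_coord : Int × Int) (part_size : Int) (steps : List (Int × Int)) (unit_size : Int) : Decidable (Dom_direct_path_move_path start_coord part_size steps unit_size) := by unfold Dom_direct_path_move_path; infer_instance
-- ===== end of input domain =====

-- B replaces A's per-index scan with bounds test by solving the bounds
-- inequalities for the step index (an interval computed by floor division),
-- then emitting only the indices of that interval; objective: faster
-- (measured: avoids iterating over all part_size indices).

-- ===== PORT A =====
def in_bounds (coord : Int × Int) : Bool :=
  coord.1 < 43 && coord.2 < 30 && coord.1 ≥ 0 && coord.2 ≥ 0

def unit_placement_in_bounds (coord : Int × Int) (unit_size : Int) : Bool :=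
  in_bounds coord && in_bounds (coord.1 + unit_size - 1, coord.2 + unit_size - 1)

def direct_path_move_path (start_coord : Int × Int) (part_size : Int) (steps : List (Int × Int)) (unit_size : Int) : List (List (Int × Int)) :=
  steps.foldl (fun result step =>
    let st := (PySem.List.pyRange 0 part_size 1).foldl
      (fun (s : (Int × Int) × List (Int × Int)) _ =>
        if unit_placement_in_bounds (s.1.1 + step.1, s.1.2 + step.2) unit_size then
          ((s.1.1 + step.1, s.1.2 + step.2), s.2 ++ [(s.1.1 + step.1, s.1.2 + step.2)])
        else
          ((s.1.1 + step.1, s.1.2 + step.2), s.2))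
      (start_coord, [])
    result ++ [st.2]) []

-- ===== PORT B =====
-- One axis constraint (c0, d, lo, hi): narrow the index interval s so that
-- lo ≤ c0 + k*d ≤ hi for every k in it (floor/ceil division when d ≠ 0).
def dpmp_axis (s : Int × Int) (t : Int × Int × Int × Int) : Int × Int :=
  if t.2.1 = 0 then
    (if t.2.2.1 ≤ t.1 ∧ t.1 ≤ t.2.2.2 then s else (s.1, s.1 - 1))
  else if 0 < t.2.1 then
    (max s.1 (-(PySem.Int.floordiv (t.1 - t.2.2.1) t.2.1)),
     min s.2 (PySem.Int.floordiv (t.2.2.2 - t.1) t.2.1))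
  else
    (max s.1 (-(PySem.Int.floordiv (t.1 - t.2.2.2) t.2.1)),
     min s.2 (PySem.Int.floordiv (t.2.2.1 - t.1) t.2.1))

def direct_path_move_path_alt (start_coord : Int × Int) (part_size : Int) (steps : List (Int × Int)) (unit_size : Int) : List (List (Int × Int)) :=
  let xlo := max 0 (1 - unit_size); let xhi := min 42 (43 - unit_size)
  let ylo := max 0 (1 - unit_size); let yhi := min 29 (30 - unit_size)
  steps.foldl (fun result step =>
    let kk := [(start_coord.1, step.1, xlo, xhi), (start_coord.2, step.2, ylo, yhi)].foldl
      dpmp_axis (1, part_size)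
    result ++ [(PySem.List.pyRange kk.1 (kk.2 + 1) 1).map
      (fun k => (start_coord.1 + k * step.1, start_coord.2 + k * step.2))]) []

-- ===== PRECONDITION & SPEC =====
def Spec_direct_path_move_path (start_coord : Int × Int) (part_size : Int) (steps : List (Int × Int)) (unit_size : Int) (out : List (List (Int × Int))) : Prop := out = direct_path_move_path_alt start_coord part_size steps unit_size
instance (start_coord : Int × Int) (part_size : Int) (steps : List (Int × Int)) (unit_size : Int) (out : List (List (Int × Int))) : Decidable (Spec_direct_path_move_path start_coord part_size steps unit_size out) := by unfold Spec_direct_path_move_path; infer_instance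

-- ===== CLAIM (what is proved, stated in full; the proofs are below) =====
def Claim_equal_direct_path_move_path : Prop := ∀ (start_coord : Int × Int) (part_size : Int) (steps : List (Int × Int)) (unit_size : Int), Dom_direct_path_move_path start_coord part_size steps unit_size → Spec_direct_path_move_path start_coord part_size steps unit_size (direct_path_move_path start_coord part_size steps unit_size)

-- ===== LEMMAS AND PROOFS =====

-- One axis update: the narrowed interval is exactly the old one cut down to
-- the ks with lo ≤ c0 + k*d ≤ hi.
lemma dpmp_axis_iff (s : Int × Int) (c0 d lo hi k : Int) :
    ((dpmp_axis s (c0, d, lo, hi)).1 ≤ k ∧ k ≤ (dpmp_axis s (c0, d, lo, hi)).2)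
      ↔ (s.1 ≤ k ∧ k ≤ s.2 ∧ lo ≤ c0 + k * d ∧ c0 + k * d ≤ hi) := by
  unfold dpmp_axis
  by_cases h0 : d = 0
  · subst h0; simp only [if_pos]
    by_cases hin : lo ≤ c0 ∧ c0 ≤ hi
    · rw [if_pos hin]; simp only [mul_zero, add_zero]; omega
    · rw [if_neg hin]; simp only [mul_zero, add_zero]; omega
  · rw [if_neg h0]
    by_cases hd : 0 < d
    · rw [if_pos hd]
      simp only [max_le_iff, le_min_iff]
      have h1 : -(PySem.Int.floordiv (c0 - lo) d) ≤ k ↔ lo ≤ c0 + k * d := by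
        rw [neg_le, PySem.Int.le_floordiv_iff_mul_le hd]
        constructor <;> intro h <;> nlinarith
      have h2 : k ≤ PySem.Int.floordiv (hi - c0) d ↔ c0 + k * d ≤ hi := by
        rw [PySem.Int.le_floordiv_iff_mul_le hd]
        constructor <;> intro h <;> nlinarith
      rw [h1, h2]; tauto
    · rw [if_neg hd]
      have hdn : 0 < -d := by omega
      simp only [max_le_iff, le_min_iff]
      have e1 : PySem.Int.floordiv (c0 - hi) d = PySem.Int.floordiv (hi - c0) (-d) := by
        rw [← PySem.Int.floordiv_neg_neg (c0 - hi) d]; norm_num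
      have e2 : PySem.Int.floordiv (lo - c0) d = PySem.Int.floordiv (c0 - lo) (-d) := by
        rw [← PySem.Int.floordiv_neg_neg (lo - c0) d]; norm_num
      have h1 : -(PySem.Int.floordiv (c0 - hi) d) ≤ k ↔ c0 + k * d ≤ hi := by
        rw [e1, neg_le, PySem.Int.le_floordiv_iff_mul_le hdn]
        constructor <;> intro h <;> nlinarith
      have h2 : k ≤ PySem.Int.floordiv (lo - c0) d ↔ lo ≤ c0 + k * d := by
        rw [e2, PySem.Int.le_floordiv_iff_mul_le hdn]
        constructor <;> intro h <;> nlinarith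
      rw [h1, h2]; tauto

-- A's bounds test, in interval form.
lemma upib_iff (us X Y : Int) :
    unit_placement_in_bounds (X, Y) us = true
      ↔ (max 0 (1 - us) ≤ X ∧ X ≤ min 42 (43 - us)
         ∧ max 0 (1 - us) ≤ Y ∧ Y ≤ min 29 (30 - us)) := by
  simp [unit_placement_in_bounds, in_bounds]
  constructor <;> intro h <;> omega

-- Filtering a range by a predicate that is exactly "k ∈ [lo, hi]" yields the
-- subrange [lo, hi] mapped.
lemma filterMap_range_eq_map_range {α : Type} (f : Int → α) (ok : Int → Bool)
    (b lo hi : Int) :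
    ∀ (a : Int), (∀ k, (a ≤ k ∧ k < b ∧ ok k = true) ↔ (lo ≤ k ∧ k ≤ hi)) →
    (PySem.List.pyRange a b 1).filterMap (fun k => if ok k then some (f k) else none)
      = (PySem.List.pyRange lo (hi + 1) 1).map f := by
  have H : ∀ (n : Nat) (a lo : Int), (b - a).toNat = n →
      (∀ k, (a ≤ k ∧ k < b ∧ ok k = true) ↔ (lo ≤ k ∧ k ≤ hi)) →
      (PySem.List.pyRange a b 1).filterMap (fun k => if ok k then some (f k) else none)
        = (PySem.List.pyRange lo (hi + 1) 1).map f := by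
    intro n
    induction n with
    | zero =>
      intro a lo ha hiff
      have hba : b ≤ a := by omega
      have hempty : hi + 1 ≤ lo := by
        by_contra hc
        have := (hiff lo).2 ⟨le_refl lo, by omega⟩
        omega
      rw [PySem.List.pyRange_one_eq_nil hba, PySem.List.pyRange_one_eq_nil hempty]
      simp
    | succ n ih =>
      intro a lo ha hiff
      have hab : a < b := by omega
      rw [PySem.List.pyRange_one_cons hab]
      simp only [List.filterMap_cons]
      by_cases hok : ok a = true
      · have haint : lo ≤ a ∧ a ≤ hi := (hiff a).1 ⟨le_refl a, hab, hok⟩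
        have hloa : lo = a := by
          by_contra hc
          have := (hiff lo).2 ⟨le_refl lo, by omega⟩
          omega
        subst hloa
        rw [if_pos hok, PySem.List.pyRange_one_cons (show lo < hi + 1 by omega)]
        simp only [List.map_cons]
        congr 1
        apply ih (lo + 1) (lo + 1) (by omega)
        intro k
        constructor
        · rintro ⟨hk1, hk2, hk3⟩
          have := (hiff k).1 ⟨by omega, hk2, hk3⟩
          exact ⟨hk1, this.2⟩
        · rintro ⟨hk1, hk2⟩
          have := (hiff k).2 ⟨by omega, hk2⟩
          exact ⟨hk1, this.2.1, this.2.2⟩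
      · rw [if_neg hok]
        apply ih (a + 1) lo (by omega)
        intro k
        constructor
        · rintro ⟨hk1, hk2, hk3⟩
          exact (hiff k).1 ⟨by omega, hk2, hk3⟩
        · rintro ⟨hk1, hk2⟩
          have h := (hiff k).2 ⟨hk1, hk2⟩
          refine ⟨?_, h.2.1, h.2.2⟩
          rcases lt_or_eq_of_le h.1 with h' | h'
          · omega
          · exfalso; rw [h'] at hok; exact hok h.2.2
  intro a hiff
  exact H (b - a).toNat a lo rfl hiff

-- Index shift: filtering range(a,b) at i+1 is filtering range(a+1,b+1).
lemma filterMap_range_shift {α : Type} (h : Int → Option α) (b : Int) :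
    ∀ (a : Int), (PySem.List.pyRange a b 1).filterMap (fun i => h (i + 1))
      = (PySem.List.pyRange (a + 1) (b + 1) 1).filterMap h := by
  have H : ∀ (n : Nat) (a : Int), (b - a).toNat = n →
      (PySem.List.pyRange a b 1).filterMap (fun i => h (i + 1))
        = (PySem.List.pyRange (a + 1) (b + 1) 1).filterMap h := by
    intro n
    induction n with
    | zero =>
      intro a ha
      rw [PySem.List.pyRange_one_eq_nil (by omega), PySem.List.pyRange_one_eq_nil (by omega)]
      simp
    | succ n ih =>
      intro a ha
      rw [PySem.List.pyRange_one_cons (by omega : a < b),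
          PySem.List.pyRange_one_cons (by omega : a + 1 < b + 1)]
      simp only [List.filterMap_cons]
      rw [ih (a + 1) (by omega)]
  intro a
  exact H (b - a).toNat a rfl

-- A's inner loop, from index a with state start + a·step: collects exactly the
-- in-bounds coordinates start + (i+1)·step.
lemma inner_loop_eq (sc step : Int × Int) (us b : Int) :
    ∀ (a : Int) (acc : List (Int × Int)),
    ((PySem.List.pyRange a b 1).foldl
      (fun (s : (Int × Int) × List (Int × Int)) _ =>
        if unit_placement_in_bounds (s.1.1 + step.1, s.1.2 + step.2) us then
          ((s.1.1 + step.1, s.1.2 + step.2), s.2 ++ [(s.1.1 + step.1, s.1.2 + step.2)])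
        else ((s.1.1 + step.1, s.1.2 + step.2), s.2))
      ((sc.1 + a * step.1, sc.2 + a * step.2), acc)).2
    = acc ++ (PySem.List.pyRange a b 1).filterMap (fun i =>
        if unit_placement_in_bounds (sc.1 + (i + 1) * step.1, sc.2 + (i + 1) * step.2) us
        then some (sc.1 + (i + 1) * step.1, sc.2 + (i + 1) * step.2) else none) := by
  have H : ∀ (n : Nat) (a : Int), (b - a).toNat = n → ∀ acc,
      ((PySem.List.pyRange a b 1).foldl
        (fun (s : (Int × Int) × List (Int × Int)) _ =>
          let c := (s.1.1 + step.1, s.1.2 + step.2)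
          if unit_placement_in_bounds c us then (c, s.2 ++ [c]) else (c, s.2))
        ((sc.1 + a * step.1, sc.2 + a * step.2), acc)).2
      = acc ++ (PySem.List.pyRange a b 1).filterMap (fun i =>
          if unit_placement_in_bounds (sc.1 + (i + 1) * step.1, sc.2 + (i + 1) * step.2) us
          then some (sc.1 + (i + 1) * step.1, sc.2 + (i + 1) * step.2) else none) := by
    intro n
    induction n with
    | zero =>
      intro a ha acc
      have hba : b ≤ a := by omega
      rw [PySem.List.pyRange_one_eq_nil hba]
      simp
    | succ n ih =>
      intro a ha acc
      have hab : a < b := by omega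
      rw [PySem.List.pyRange_one_cons hab]
      simp only [List.foldl_cons, List.filterMap_cons]
      have hc : (sc.1 + a * step.1 + step.1, sc.2 + a * step.2 + step.2)
          = (sc.1 + (a + 1) * step.1, sc.2 + (a + 1) * step.2) := by
        rw [Prod.mk.injEq]; exact ⟨by ring, by ring⟩
      rw [hc]
      by_cases h : unit_placement_in_bounds
          (sc.1 + (a + 1) * step.1, sc.2 + (a + 1) * step.2) us = true
      · rw [if_pos h, if_pos h,
          ih (a + 1) (by omega) (acc ++ [(sc.1 + (a + 1) * step.1, sc.2 + (a + 1) * step.2)])]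
        simp
      · rw [if_neg h, if_neg h, ih (a + 1) (by omega) acc]
  intro a acc
  exact H (b - a).toNat a rfl acc

-- Outer loop: appending one path per step is just a map.
lemma outer_foldl_eq {α β : Type} (f : α → β) (steps : List α) :
    ∀ init : List β, steps.foldl (fun r s => r ++ [f s]) init = init ++ steps.map f := by
  induction steps with
  | nil => intro init; simp
  | cons s t ih => intro init; simp [List.foldl_cons, ih]

-- ===== VERDICT (by name: the statement is the Claim_ definition above) =====
theorem direct_path_move_path_spec : Claim_equal_direct_path_move_path := by
  intro sc ps steps us _
  unfold Spec_direct_path_move_path direct_path_move_path direct_path_move_path_alt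
  simp only []
  rw [outer_foldl_eq, outer_foldl_eq]
  simp only [List.nil_append]
  apply List.map_congr_left
  intro step _
  -- A's inner loop as a filterMap over range(1, ps+1)
  have hA := inner_loop_eq sc step us ps 0 []
  simp only [zero_mul, add_zero, Prod.mk.eta, List.nil_append] at hA
  rw [hA, filterMap_range_shift
    (fun k => if unit_placement_in_bounds (sc.1 + k * step.1, sc.2 + k * step.2) us
              then some (sc.1 + k * step.1, sc.2 + k * step.2) else none) ps 0]
  -- B's interval after the two axis updates
  simp only [List.foldl_cons, List.foldl_nil]
  set kk := dpmp_axis (dpmp_axis (1, ps)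
      (sc.1, step.1, max 0 (1 - us), min 42 (43 - us)))
      (sc.2, step.2, max 0 (1 - us), min 29 (30 - us)) with hkk
  apply filterMap_range_eq_map_range
    (fun k => (sc.1 + k * step.1, sc.2 + k * step.2))
    (fun k => unit_placement_in_bounds (sc.1 + k * step.1, sc.2 + k * step.2) us)
    (ps + 1) kk.1 kk.2 (0 + 1)
  intro k
  have h1 := dpmp_axis_iff (1, ps) sc.1 step.1 (max 0 (1 - us)) (min 42 (43 - us)) k
  have h2 := dpmp_axis_iff (dpmp_axis (1, ps)
      (sc.1, step.1, max 0 (1 - us), min 42 (43 - us)))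
      sc.2 step.2 (max 0 (1 - us)) (min 29 (30 - us)) k
  rw [hkk, h2, upib_iff]
  simp only [zero_add, Int.lt_add_one_iff]
  tauto
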